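-- pv_equiv track=rewrite | github.com/akashksinghal/NPTEL-Course---Programming-Data-Structures-And-Algorithms-Using-Python | Online Test 1/Question8.py | maxaggregate
-- ===== SOURCE A (Python) =====
-- def maxaggregate(tup):
--   D={}
--   for (a,b) in tup:
--     if a in D:
--       D[a]=D[a]+b
--     else:
--       D[a]=b
--   maximum = max(D, key=D.get)
--   A=[]
--   for i in D:
--     if D[i] == D[maximum]:
--       A.append(i)
--   A.sort()
--   return A
-- ===== SOURCE B (Python) =====
-- def maxaggregate(tup):
--     D = {}
--     for a, b in tup:
--         D[a] = D.get(a, 0) + b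
--     inv = {}
--     for k, v in D.items():
--         inv[v] = inv.get(v, []) + [k]
--     return sorted(inv[max(inv)])
-- ===== Notes on version B (the rewrite author's own statement) =====
-- stated objective: alternative
-- what changed: Replaces A's max-key search (max with key=D.get) plus a second filtering scan over D with an inverse group-by dict mapping each aggregated sum to its list of keys, returning the sorted bucket of the maximal sum; the aggregation loop is collapsed to a single D.get-based update.
import Mathlib
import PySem

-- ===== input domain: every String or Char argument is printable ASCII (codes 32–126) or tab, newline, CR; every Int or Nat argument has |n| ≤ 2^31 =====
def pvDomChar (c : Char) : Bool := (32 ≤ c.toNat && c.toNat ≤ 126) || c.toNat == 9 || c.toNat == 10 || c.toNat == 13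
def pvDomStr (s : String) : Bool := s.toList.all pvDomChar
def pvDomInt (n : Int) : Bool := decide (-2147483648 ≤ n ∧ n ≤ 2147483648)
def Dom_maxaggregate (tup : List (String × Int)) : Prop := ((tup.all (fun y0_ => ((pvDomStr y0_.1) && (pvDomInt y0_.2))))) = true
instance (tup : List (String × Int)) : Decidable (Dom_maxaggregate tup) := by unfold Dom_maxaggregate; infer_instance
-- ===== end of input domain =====

-- B groups keys by aggregated sum in an inverse dict and returns the sorted bucket of the maximal sum,
-- instead of A's max-key search followed by a filtering scan of D.

-- ===== PORT A =====
def maxaggregate (tup : List (String × Int)) : List String :=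
  let D := tup.foldl
    (fun d p => if d.contains p.1 then d.insert p.1 (d.getD p.1 0 + p.2) else d.insert p.1 p.2)
    PySem.Dict.empty
  match PySem.List.max? D.keys (fun k => D.getD k 0) with
  | none => []  -- Python: max() of an empty dict raises ValueError; excluded by Pre_
  | some m =>
    let A := D.keys.foldl (fun acc i => if D.getD i 0 == D.getD m 0 then acc ++ [i] else acc) []
    PySem.List.sorted A (fun x => x) false

-- ===== PORT B =====
def maxaggregate_alt (tup : List (String × Int)) : List String :=
  let D := tup.foldl (fun d p => d.insert p.1 (d.getD p.1 0 + p.2)) PySem.Dict.empty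
  let inv := D.items.foldl
    (fun (v : PySem.Dict Int (List String)) p => v.insert p.2 (v.getD p.2 [] ++ [p.1]))
    PySem.Dict.empty
  match PySem.List.max? inv.keys (fun v => v) with
  | none => []  -- Python: max() of an empty dict raises ValueError; excluded by Pre_
  | some M => PySem.List.sorted (inv.getD M []) (fun x => x) false

-- ===== PRECONDITION & SPEC =====
-- Pre_ excludes only the empty list, on which A's max() raises ValueError.
def Pre_maxaggregate (tup : List (String × Int)) : Prop := tup ≠ []
instance (tup : List (String × Int)) : Decidable (Pre_maxaggregate tup) := by unfold Pre_maxaggregate; infer_instance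
def pvWitness_maxaggregate : (List (String × Int)) := [("a", 1)]
def Spec_maxaggregate (tup : List (String × Int)) (out : List String) : Prop := out = maxaggregate_alt tup
instance (tup : List (String × Int)) (out : List String) : Decidable (Spec_maxaggregate tup out) := by unfold Spec_maxaggregate; infer_instance

-- ===== CLAIM (what is proved, stated in full; the proofs are below) =====
def Claim_equal_maxaggregate : Prop := ∀ (tup : List (String × Int)), Dom_maxaggregate tup → Pre_maxaggregate tup → Spec_maxaggregate tup (maxaggregate tup)

-- ===== LEMMAS AND PROOFS =====

-- A's two-branch aggregation step equals B's single D.get-based step.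
lemma agg_eq (l : List (String × Int)) (d : PySem.Dict String Int) :
    l.foldl (fun d p => if d.contains p.1 then d.insert p.1 (d.getD p.1 0 + p.2) else d.insert p.1 p.2) d
      = l.foldl (fun d p => d.insert p.1 (d.getD p.1 0 + p.2)) d := by
  induction l generalizing d with
  | nil => rfl
  | cons p l ih =>
    simp only [List.foldl_cons]
    rw [← ih]
    congr 1
    by_cases h : d.contains p.1 = true
    · simp [h]
    · simp only [Bool.not_eq_true] at h
      simp [h, PySem.Dict.getD_of_not_contains d 0 h]

-- the selection phases agree over any aggregation dict with distinct keys
lemma core (D : PySem.Dict String Int) (hnd : D.keys.Nodup) (hkne : D.keys ≠ []) :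
    (match PySem.List.max? D.keys (fun k => D.getD k 0) with
     | none => []
     | some m => PySem.List.sorted
         (D.keys.foldl (fun acc i => if D.getD i 0 == D.getD m 0 then acc ++ [i] else acc) [])
         (fun x => x) false)
    = (match PySem.List.max?
          (D.items.foldl
            (fun (v : PySem.Dict Int (List String)) p => v.insert p.2 (v.getD p.2 [] ++ [p.1]))
            PySem.Dict.empty).keys (fun v => v) with
       | none => []
       | some M => PySem.List.sorted
           ((D.items.foldl
              (fun (v : PySem.Dict Int (List String)) p => v.insert p.2 (v.getD p.2 [] ++ [p.1]))
              PySem.Dict.empty).getD M [])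
           (fun x => x) false) := by
  set inv := D.items.foldl
      (fun (v : PySem.Dict Int (List String)) p => v.insert p.2 (v.getD p.2 [] ++ [p.1]))
      PySem.Dict.empty with hinv
  have hitems : D.items = D.keys.map (fun k => (k, D.getD k 0)) :=
    PySem.Dict.items_eq_map_keys D hnd 0
  have hinvkeys : inv.keys = PySem.Set.ofList (D.items.map (fun p => p.2)) := by
    rw [hinv, PySem.Dict.keys_foldl_insert_key D.items (fun p => p.2) _ _, PySem.Dict.keys_empty,
      PySem.Set.update_nil_left]
  have hinvget : ∀ c, inv.getD c [] = (D.items.filter (fun p => p.2 == c)).map (fun p => p.1) := by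
    intro c
    have h1 : inv = (D.items.map Prod.swap).foldl
        (fun (d : PySem.Dict Int (List String)) p => d.modify p.1 [] (fun x => x ++ [p.2]))
        PySem.Dict.empty := by
      rw [List.foldl_map]; rfl
    rw [h1, PySem.Dict.getD_foldl_modify_append, PySem.Dict.getD_empty]
    simp [List.filter_map, Function.comp_def, List.map_map]
  obtain ⟨m, hm⟩ : ∃ m, PySem.List.max? D.keys (fun k => D.getD k 0) = some m := by
    cases h : PySem.List.max? D.keys (fun k => D.getD k 0) with
    | none => exact absurd ((PySem.List.max?_eq_none_iff _ _).mp h) hkne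
    | some m => exact ⟨m, rfl⟩
  have hvals_mem : D.getD m 0 ∈ D.items.map (fun p => p.2) := by
    rw [hitems, List.map_map]
    exact List.mem_map.mpr ⟨m, PySem.List.max?_mem hm, rfl⟩
  have hinvkne : inv.keys ≠ [] := by
    rw [hinvkeys]
    exact List.ne_nil_of_mem ((PySem.Set.mem_ofList _ _).mpr hvals_mem)
  obtain ⟨M, hM⟩ : ∃ M, PySem.List.max? inv.keys (fun v => v) = some M := by
    cases h : PySem.List.max? inv.keys (fun v => v) with
    | none => exact absurd ((PySem.List.max?_eq_none_iff _ _).mp h) hinvkne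
    | some M => exact ⟨M, rfl⟩
  have hMeq : M = D.getD m 0 := by
    have hMmem : M ∈ D.items.map (fun p => p.2) := by
      have := PySem.List.max?_mem hM
      rwa [hinvkeys, PySem.Set.mem_ofList] at this
    obtain ⟨k, hk, hkM⟩ := List.mem_map.mp (by rwa [hitems, List.map_map] at hMmem)
    have h1 : M ≤ D.getD m 0 := hkM ▸ PySem.List.max?_isMax hm k hk
    have h2 : D.getD m 0 ≤ M :=
      PySem.List.max?_isMax hM _ (by rw [hinvkeys]; exact (PySem.Set.mem_ofList _ _).mpr hvals_mem)
    exact le_antisymm h1 h2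
  rw [hm, hM]
  simp only []
  congr 1
  have hA : (D.keys.foldl (fun acc i => if D.getD i 0 == D.getD m 0 then acc ++ [i] else acc)
      ([] : List String)) = D.keys.filter (fun i => D.getD i 0 == D.getD m 0) := by
    have h := PySem.List.foldl_append_if (fun i => D.getD i 0 == D.getD m 0) id D.keys []
    simpa using h
  rw [hA, hinvget M, hitems, hMeq]
  simp [List.filter_map, Function.comp_def, List.map_map]

lemma main_eq (tup : List (String × Int)) (hne : tup ≠ []) :
    maxaggregate tup = maxaggregate_alt tup := by
  unfold maxaggregate maxaggregate_alt
  simp only [agg_eq]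
  have hnd : (tup.foldl (fun d p => d.insert p.1 (d.getD p.1 0 + p.2))
      PySem.Dict.empty).keys.Nodup :=
    PySem.Dict.nodup_keys_foldl_insert_key tup (fun p => p.1) _ _
      (by simp [PySem.Dict.keys_empty])
  have hkeys : (tup.foldl (fun d p => d.insert p.1 (d.getD p.1 0 + p.2))
      PySem.Dict.empty).keys = PySem.Set.ofList (tup.map (fun p => p.1)) := by
    rw [PySem.Dict.keys_foldl_insert_key tup (fun p => p.1) _ _, PySem.Dict.keys_empty,
      PySem.Set.update_nil_left]
  have hkne : (tup.foldl (fun d p => d.insert p.1 (d.getD p.1 0 + p.2))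
      PySem.Dict.empty).keys ≠ [] := by
    obtain ⟨q, t, rfl⟩ : ∃ q t, tup = q :: t := by
      cases tup with
      | nil => exact absurd rfl hne
      | cons q t => exact ⟨q, t, rfl⟩
    refine List.ne_nil_of_mem (a := q.1) ?_
    rw [hkeys]
    exact (PySem.Set.mem_ofList _ _).mpr (by simp)
  exact core _ hnd hkne

-- ===== VERDICT (by name: the statement is the Claim_ definition above) =====
theorem maxaggregate_spec : Claim_equal_maxaggregate := by
  intro tup _ hne
  exact main_eq tup hne
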